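-- pv_equiv track=rewrite | github.com/KimiGets0FPS/Learn-Python | Homework/Week 50 HW/largest_num_once.py | largest_num_once
-- ===== SOURCE A (Python) =====
-- import math
--
-- def largest_num_once(nums: list[int]):
--     """
--     >>> largest_num_once([1, 1, 2, 3, 3])
--     2
--     >>> largest_num_once([1, 2, 2, 3])
--     3
--     >>> largest_num_once([2, 1, 4, 5, 2, 1, 4])
--     5
--     >>> largest_num_once([1, 2, 2, 4])
--     4
--     >>> largest_num_once([-5, -2, -3])
--     -2
--     """
--     # Criteria: Find the largest number in a list that only appeared once
--     temp = {}
--     for i in nums: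
--         if i not in temp:  # Had to use this because that one didn't work
--             temp[i] = 0
--         temp[i] += 1
--     max_val = -math.inf
--     for x, y in temp.items():
--         if y == 1 and max_val < x:
--             max_val = x
--     if max_val == -math.inf:
--         return -1
--     return max_val
-- ===== SOURCE B (Python) =====
-- def largest_num_once(nums: list[int]):
--     # sort a copy, scan runs of equal values; the last run of length 1 is the answer
--     best = None
--     s = sorted(nums)
--     i, n = 0, len(s)
--     while i < n:
--         j = i + 1
--         while j < n and s[j] == s[i]:
--             j += 1
--         if j - i == 1:
--             best = s[i]
--         i = j
--     return -1 if best is None else best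
-- ===== Notes on version B (the rewrite author's own statement) =====
-- stated objective: alternative
-- what changed: B replaces A's dict-of-counts plus a second max-scan over the items by sorting a copy of the list and scanning consecutive runs once, keeping the last run of length exactly 1 (which, in ascending order, is the largest singleton).
import Mathlib
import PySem

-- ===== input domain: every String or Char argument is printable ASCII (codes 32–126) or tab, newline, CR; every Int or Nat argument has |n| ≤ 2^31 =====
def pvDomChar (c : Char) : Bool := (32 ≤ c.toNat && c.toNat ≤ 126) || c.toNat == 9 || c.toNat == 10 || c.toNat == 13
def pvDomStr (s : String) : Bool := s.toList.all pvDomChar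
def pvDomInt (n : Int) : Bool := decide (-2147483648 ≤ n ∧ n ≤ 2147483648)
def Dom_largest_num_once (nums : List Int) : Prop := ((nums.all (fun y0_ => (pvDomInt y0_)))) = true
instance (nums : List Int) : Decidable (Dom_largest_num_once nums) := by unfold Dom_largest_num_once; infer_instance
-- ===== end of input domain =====

-- B sorts a copy of the list and scans consecutive runs once, keeping the last run of
-- length exactly 1, instead of A's dict of counts plus a second max-scan over the items.

-- ===== PORT A =====
-- max_val = -math.inf is modelled as `none` (no candidate yet); `-inf < x` is always true.
def largest_num_once (nums : List Int) : Int :=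
  let temp := nums.foldl (fun d i =>
    let d := if d.contains i then d else d.insert i (0 : Int)
    d.insert i (d.getD i 0 + 1)) PySem.Dict.empty
  let max_val := temp.items.foldl (fun mv p =>
    if p.2 == (1 : Int) && (match mv with | none => true | some m => decide (m < p.1))
    then some p.1 else mv) (none : Option Int)
  match max_val with
  | none => -1
  | some m => m

-- ===== PORT B =====
-- the inner while-loop: a run of values equal to the head; `best` is overwritten by
-- each run of length 1, so it ends as the last (= largest, list being sorted) singleton
def pvRunScan (best : Option Int) : List Int → Option Int
  | [] => best
  | x :: rest =>
      pvRunScan (if (rest.takeWhile (fun y => y == x)).isEmpty then some x else best)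
        (rest.dropWhile (fun y => y == x))
  termination_by l => l.length
  decreasing_by
    exact Nat.lt_succ_of_le (List.Sublist.length_le (List.dropWhile_sublist _))

def largest_num_once_alt (nums : List Int) : Int :=
  match pvRunScan none (PySem.List.sorted nums (fun x => x) false) with
  | none => -1
  | some m => m

-- ===== PRECONDITION & SPEC =====
def Spec_largest_num_once (nums : List Int) (out : Int) : Prop := out = largest_num_once_alt nums
instance (nums : List Int) (out : Int) : Decidable (Spec_largest_num_once nums out) := by unfold Spec_largest_num_once; infer_instance

-- ===== CLAIM (what is proved, stated in full; the proofs are below) =====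
def Claim_equal_largest_num_once : Prop := ∀ (nums : List Int), Dom_largest_num_once nums → Spec_largest_num_once nums (largest_num_once nums)

-- ===== LEMMAS AND PROOFS =====

-- running maximum with an Option accumulator (the shape of A's second loop)
def pvRunMax (acc : Option Int) (L : List Int) : Option Int :=
  L.foldl (fun mv x =>
    if (match mv with | none => true | some m => decide (m < x)) then some x else mv) acc

-- A's first loop builds exactly Counter(nums)
theorem pvDict_eq_counter (nums : List Int) :
    nums.foldl (fun d i =>
      let d := if d.contains i then d else d.insert i (0 : Int)
      d.insert i (d.getD i 0 + 1)) PySem.Dict.empty = PySem.Dict.counter nums := by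
  have hstep : (fun (d : PySem.Dict Int Int) (i : Int) =>
      let d := if d.contains i then d else d.insert i (0 : Int)
      d.insert i (d.getD i 0 + 1))
      = fun d i => d.insert i (d.getD i 0 + 1) := by
    funext d i
    by_cases h : d.contains i
    · simp [h]
    · simp only [h, if_neg, Bool.false_eq_true, not_false_eq_true]
      rw [PySem.Dict.getD_insert_self, PySem.Dict.insert_insert_self,
        PySem.Dict.getD_of_not_contains _ _ (by simpa using h)]
  rw [hstep, PySem.Dict.foldl_insert_getD_add_one_eq_counter]

-- A's second loop is a running max over the first components of the count-1 items
theorem pvFoldPairs_eq_runMax (L : List (Int × Int)) (acc : Option Int) :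
    L.foldl (fun mv p =>
      if p.2 == (1 : Int) && (match mv with | none => true | some m => decide (m < p.1))
      then some p.1 else mv) acc
    = pvRunMax acc ((L.filter (fun p => p.2 == (1 : Int))).map Prod.fst) := by
  induction L generalizing acc with
  | nil => rfl
  | cons p t ih =>
      by_cases hp : p.2 == (1 : Int)
      · rw [List.foldl_cons, ih]
        simp [pvRunMax, hp]
      · rw [List.foldl_cons, ih]
        simp [pvRunMax, hp]

theorem pvRunMax_some (a : Int) (L : List Int) :
    pvRunMax (some a) L = some (L.foldl max a) := by
  induction L generalizing a with
  | nil => rfl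
  | cons x t ih =>
      simp only [pvRunMax, List.foldl_cons]
      by_cases h : a < x
      · have : max a x = x := max_eq_right (le_of_lt h)
        simpa [pvRunMax, h, this] using ih x
      · have : max a x = a := max_eq_left (le_of_not_gt h)
        simpa [pvRunMax, h, this] using ih a

theorem pvRunMax_none_cons (a : Int) (L : List Int) :
    pvRunMax none (a :: L) = some (L.foldl max a) := by
  have : pvRunMax none (a :: L) = pvRunMax (some a) L := by simp [pvRunMax]
  rw [this, pvRunMax_some]

-- the last element of a ≤-sorted list bounds every element
theorem pvGetLast?_isMax (l : List Int) (h : l.Pairwise (· ≤ ·)) (m : Int)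
    (hm : l.getLast? = some m) : ∀ y ∈ l, y ≤ m := by
  induction l with
  | nil => simp at hm
  | cons x t ih =>
      cases t with
      | nil =>
          simp at hm
          simp [hm]
      | cons b u =>
          have hm' : (b :: u).getLast? = some m := by
            simpa [List.getLast?_cons_cons] using hm
          have hp := List.pairwise_cons.mp h
          intro y hy
          rcases List.mem_cons.mp hy with rfl | hy'
          · have hmmem : m ∈ b :: u := List.mem_of_getLast? hm'
            exact hp.1 m hmmem
          · exact ih hp.2 hm' y hy'


-- B's scan over a sorted list returns the last count-1 element (or `best`)
theorem pvRunScan_sorted (n : ℕ) (s : List Int) (hn : s.length ≤ n)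
    (h : s.Pairwise (· ≤ ·)) (best : Option Int) :
    pvRunScan best s =
      match (s.filter (fun z => s.count z == 1)).getLast? with
      | none => best
      | some m => some m := by
  induction n generalizing s best with
  | zero =>
      have hs : s = [] := List.eq_nil_of_length_eq_zero (Nat.le_zero.mp hn)
      subst hs; simp [pvRunScan]
  | succ n ih =>
      cases s with
      | nil => simp [pvRunScan]
      | cons x rest =>
        have hx : ∀ y ∈ rest, x ≤ y := (List.pairwise_cons.mp h).1
        have hrest : rest.Pairwise (· ≤ ·) := (List.pairwise_cons.mp h).2
        have h1 : rest.takeWhile (fun y => y == x) ++ rest.dropWhile (fun y => y == x) = rest :=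
          List.takeWhile_append_dropWhile
        have h2 : ∀ y ∈ rest.takeWhile (fun y => y == x), y = x := fun y hy => by
          have := List.mem_takeWhile_imp hy; simpa using this
        have htailpw : (rest.dropWhile (fun y => y == x)).Pairwise (· ≤ ·) :=
          hrest.sublist (List.dropWhile_sublist _)
        have h3 : ∀ y ∈ rest.dropWhile (fun y => y == x), x < y := by
          cases htl : rest.dropWhile (fun y => y == x) with
          | nil => simp
          | cons d t' =>
              have hne : rest.dropWhile (fun y => y == x) ≠ [] := by simp [htl]
              have hdne : (d == x) = false := by
                have hh := List.head_dropWhile_not (fun y => y == x) hne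
                have hhd : (rest.dropWhile (fun y => y == x)).head hne = d := by
                  simp [htl]
                rwa [hhd] at hh
              have hdrest : d ∈ rest := (List.dropWhile_sublist _).mem (by rw [htl]; exact List.mem_cons_self ..)
              have hxd : x < d :=
                lt_of_le_of_ne (hx d hdrest) (fun hxe => by simp [← hxe] at hdne)
              intro y hy
              rcases List.mem_cons.mp hy with rfl | hy'
              · exact hxd
              · have hdt : ∀ z ∈ t', d ≤ z := by
                  rw [htl] at htailpw
                  exact (List.pairwise_cons.mp htailpw).1
                exact lt_of_lt_of_le hxd (hdt y hy')
        have hxnotin : x ∉ rest.dropWhile (fun y => y == x) :=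
          fun hmem => lt_irrefl x (h3 x hmem)
        have hcrest : rest.count x = (rest.takeWhile (fun y => y == x)).length := by
          rw [← congrArg (List.count x) h1, List.count_append,
            List.count_eq_length.mpr (fun b hb => (h2 b hb).symm),
            List.count_eq_zero.mpr hxnotin]
          rfl
        have hcx : (x :: rest).count x = (rest.takeWhile (fun y => y == x)).length + 1 := by
          rw [List.count_cons_self, hcrest]
        have hct : ∀ y ∈ rest.dropWhile (fun y => y == x),
            (x :: rest).count y = (rest.dropWhile (fun y => y == x)).count y := by
          intro y hy
          have hyx : y ≠ x := ne_of_gt (h3 y hy)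
          have hynot : y ∉ rest.takeWhile (fun y => y == x) := fun hmem => hyx (h2 y hmem)
          have hr : rest.count y = (rest.dropWhile (fun y => y == x)).count y := by
            rw [← congrArg (List.count y) h1, List.count_append,
              List.count_eq_zero.mpr hynot, Nat.zero_add]
          simp [Ne.symm hyx, hr]
        have hfilter_tail : (rest.dropWhile (fun y => y == x)).filter
              (fun z => (x :: rest).count z == 1)
            = (rest.dropWhile (fun y => y == x)).filter
              (fun z => (rest.dropWhile (fun y => y == x)).count z == 1) :=
          List.filter_congr (fun z hz => by rw [hct z hz])
        have hlen : (rest.dropWhile (fun y => y == x)).length ≤ n :=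
          le_trans (List.Sublist.length_le (List.dropWhile_sublist _))
            (Nat.le_of_succ_le_succ hn)
        rw [pvRunScan]
        by_cases hse : rest.takeWhile (fun y => y == x) = []
        · have htail_eq : rest.dropWhile (fun y => y == x) = rest := by
            rw [hse] at h1; simpa using h1
          have hPx : ((x :: rest).count x == 1) = true := by
            rw [hcx, hse]; rfl
          rw [hse]
          simp only [List.isEmpty_nil, if_true]
          rw [htail_eq] at hfilter_tail hlen htailpw
          rw [htail_eq, ih rest hlen htailpw (some x)]
          have hfe : List.filter (fun z => List.count z (x :: rest) == 1) (x :: rest)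
              = x :: List.filter (fun z => List.count z rest == 1) rest := by
            rw [List.filter_cons, if_pos hPx, hfilter_tail]
          rw [hfe]
          cases hG : List.filter (fun z => List.count z rest == 1) rest with
          | nil => simp
          | cons g t' =>
              rw [List.getLast?_cons_cons]
              cases hgl : (g :: t').getLast? with
              | none => simp at hgl
              | some m => rfl
        · have hPx : ((x :: rest).count x == 1) = false := by
            rw [hcx]; simpa using hse
          have hisE : (rest.takeWhile (fun y => y == x)).isEmpty = false := by
            simpa [List.isEmpty_iff] using hse
          rw [hisE]
          simp only [Bool.false_eq_true, if_false]
          rw [ih _ hlen htailpw best, ← hfilter_tail]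
          have hnil : List.filter (fun z => List.count z (x :: rest) == 1)
              (rest.takeWhile (fun y => y == x)) = [] :=
            List.filter_eq_nil_iff.mpr (fun a ha => by
              show ¬(List.count a (x :: rest) == 1) = true
              rw [h2 a ha, hPx]; simp)
          have hfe : List.filter (fun z => List.count z (x :: rest) == 1) (x :: rest)
              = List.filter (fun z => List.count z (x :: rest) == 1)
                  (rest.dropWhile (fun y => y == x)) := by
            rw [List.filter_cons, if_neg (by
                show ¬(List.count x (x :: rest) == 1) = true
                rw [hPx]; simp),
              ← congrArg (List.filter (fun z => List.count z (x :: rest) == 1)) h1,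
              List.filter_append, hnil, List.nil_append]
          rw [hfe]

-- two lists with the same members, the second ≤-sorted: running max of the first
-- = last element of the second (with -1 for the empty case)
theorem pvCombine (Sa Hs : List Int) (hmem : ∀ z, z ∈ Sa ↔ z ∈ Hs)
    (hHspw : Hs.Pairwise (· ≤ ·)) :
    (match pvRunMax none Sa with | none => (-1 : Int) | some m => m)
    = (match Hs.getLast? with | none => (-1 : Int) | some m => m) := by
  cases hSa0 : Sa with
  | nil =>
      have hHs0 : Hs = [] := by
        rw [List.eq_nil_iff_forall_not_mem]
        intro z hz
        have hzSa : z ∈ Sa := (hmem z).mpr hz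
        rw [hSa0] at hzSa
        exact absurd hzSa (List.not_mem_nil)
      rw [hHs0]; rfl
  | cons a t =>
      rw [pvRunMax_none_cons]
      have hmax : PySem.List.max? Sa (fun y => y) = some (t.foldl max a) := by
        rw [hSa0, PySem.List.max?_id_cons]
      have hm1Sa : t.foldl max a ∈ Sa := PySem.List.max?_mem hmax
      have hm1Hs : t.foldl max a ∈ Hs := (hmem _).mp hm1Sa
      have hHsne : Hs ≠ [] := fun h0 => by
        rw [h0] at hm1Hs; exact absurd hm1Hs (List.not_mem_nil)
      obtain ⟨m2, hm2⟩ : ∃ m2, Hs.getLast? = some m2 := by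
        cases hg : Hs.getLast? with
        | none => exact absurd (List.getLast?_eq_none_iff.mp hg) hHsne
        | some m2 => exact ⟨m2, rfl⟩
      have hle1 : t.foldl max a ≤ m2 := pvGetLast?_isMax Hs hHspw m2 hm2 _ hm1Hs
      have hm2Sa : m2 ∈ Sa := (hmem m2).mpr (List.mem_of_getLast? hm2)
      have hle2 : m2 ≤ t.foldl max a := by
        simpa using PySem.List.max?_isMax hmax m2 hm2Sa
      rw [hm2, le_antisymm hle1 hle2]

theorem largest_num_once_spec' (nums : List Int) :
    largest_num_once nums = largest_num_once_alt nums := by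
  have hA : largest_num_once nums =
      match pvRunMax none ((PySem.Set.ofList nums).filter
          (fun k => List.count k nums == 1)) with
      | none => (-1 : Int) | some m => m := by
    simp only [largest_num_once]
    rw [pvDict_eq_counter, PySem.Dict.items_counter, pvFoldPairs_eq_runMax,
      List.filter_map, List.map_map]
    have hq : ((fun p : Int × Int => p.2 == (1 : Int)) ∘
          fun k => (k, (List.count k nums : Int)))
        = fun k => (List.count k nums == 1) := by
      funext k
      show ((List.count k nums : Int) == (1 : Int)) = (List.count k nums == 1)
      by_cases hc : List.count k nums = 1 <;> simp [hc]
    have hf : (Prod.fst ∘ fun k : Int => (k, (List.count k nums : Int))) = id := rfl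
    rw [hq, hf, List.map_id]
  have hpw : (PySem.List.sorted nums (fun x => x) false).Pairwise (· ≤ ·) := by
    simpa using PySem.List.sorted_pairwise nums (fun x => x)
  have hB : largest_num_once_alt nums =
      match ((PySem.List.sorted nums (fun x => x) false).filter
          (fun z => List.count z nums == 1)).getLast? with
      | none => (-1 : Int) | some m => m := by
    simp only [largest_num_once_alt]
    rw [pvRunScan_sorted (PySem.List.sorted nums (fun x => x) false).length _ le_rfl hpw none]
    have hfc : (PySem.List.sorted nums (fun x => x) false).filter
          (fun z => List.count z (PySem.List.sorted nums (fun x => x) false) == 1)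
        = (PySem.List.sorted nums (fun x => x) false).filter
          (fun z => List.count z nums == 1) :=
      List.filter_congr (fun z _ => by
        rw [(PySem.List.sorted_perm nums (fun x => x) false).count_eq])
    rw [hfc]
    cases ((PySem.List.sorted nums (fun x => x) false).filter
        (fun z => List.count z nums == 1)).getLast? <;> rfl
  rw [hA, hB]
  apply pvCombine
  · intro z
    simp only [List.mem_filter, PySem.Set.mem_ofList,
      (PySem.List.sorted_perm nums (fun x => x) false).mem_iff]
  · exact hpw.sublist List.filter_sublist

-- ===== VERDICT (by name: the statement is the Claim_ definition above) =====
theorem largest_num_once_spec : Claim_equal_largest_num_once := by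
  intro nums _
  unfold Spec_largest_num_once
  exact largest_num_once_spec' nums
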